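-- pv_equiv track=rewrite | github.com/romanpauk/time-trace | src/time_trace/elf_writer.py | _llvm_name
-- ===== SOURCE A (Python) =====
-- def _llvm_name(symbol_name: str) -> str:
--     escaped: list[str] = []
--     for char in symbol_name:
--         code_point = ord(char)
--         if char in {'"', "\\"} or code_point < 0x20 or code_point > 0x7E:
--             escaped.append(f"\\{code_point:02X}")
--         else:
--             escaped.append(char)
--     return '"' + "".join(escaped) + '"'
-- ===== SOURCE B (Python) =====
-- import re
--
-- _NEEDS_ESCAPE = re.compile(r'["\\]|[^\x20-\x7E]')
--
--
-- def _escape(m):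
--     return f"\\{ord(m.group()):02X}"
--
--
-- def _llvm_name(symbol_name: str) -> str:
--     return '"' + _NEEDS_ESCAPE.sub(_escape, symbol_name) + '"'
-- ===== Notes on version B (the rewrite author's own statement) =====
-- stated objective: idiomatic
-- what changed: Replaces the explicit per-character ord-and-branch loop that accumulates a list of fragments with a single precompiled regex substitution (character class ["\\]|[^\x20-\x7E], replacement callback formatting the uppercase two-digit hex escape), wrapped in quotes.
import Mathlib
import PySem

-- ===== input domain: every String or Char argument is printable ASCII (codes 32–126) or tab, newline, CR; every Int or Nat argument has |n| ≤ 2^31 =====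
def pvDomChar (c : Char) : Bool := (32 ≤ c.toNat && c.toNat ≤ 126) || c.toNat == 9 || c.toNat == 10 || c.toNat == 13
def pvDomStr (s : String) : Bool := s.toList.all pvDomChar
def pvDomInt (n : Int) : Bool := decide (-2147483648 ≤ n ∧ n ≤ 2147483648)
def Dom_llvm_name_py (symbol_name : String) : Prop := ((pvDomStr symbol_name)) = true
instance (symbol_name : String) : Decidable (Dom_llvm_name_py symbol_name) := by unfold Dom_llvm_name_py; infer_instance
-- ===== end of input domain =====

-- B replaces A's explicit per-character ord-and-branch accumulator loop with a single regex
-- substitution (ported by hand below, exact on the stated domain); same O(n) cost, more idiomatic.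

-- ===== PORT A =====
-- f"\{code_point:02X}": uppercase hex digit; two digits, exact for code points < 256 (all of Dom)
def pvHexDigitA (n : Nat) : Char := if n < 10 then Char.ofNat (48 + n) else Char.ofNat (55 + n)

def llvm_name_py (symbol_name : String) : String :=
  -- escaped: list of fragments accumulated by the for-loop, in order
  let escaped : List (List Char) := symbol_name.toList.foldl (fun acc char =>
    let code_point := char.toNat
    if char = '"' ∨ char = '\\' ∨ code_point < 0x20 ∨ code_point > 0x7E then
      acc ++ [['\\', pvHexDigitA (code_point / 16), pvHexDigitA (code_point % 16)]]
    else
      acc ++ [[char]]) []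
  -- '"' + "".join(escaped) + '"'
  String.ofList ('"' :: escaped.flatten ++ ['"'])

-- ===== PORT B =====
-- hand port of the compiled regex r'["\\]|[^\x20-\x7E]': does this single char match?
def pvRegexMatchB (c : Char) : Bool := c == '"' || c == '\\' || !(0x20 ≤ c.toNat && c.toNat ≤ 0x7E)

-- _escape(m) = f"\\{ord(m.group()):02X}" (two uppercase hex digits; exact for code points < 256, all of Dom)
def pvEscapeB (c : Char) : List Char :=
  ['\\', (if c.toNat / 16 < 10 then Char.ofNat (48 + c.toNat / 16) else Char.ofNat (55 + c.toNat / 16)),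
         (if c.toNat % 16 < 10 then Char.ofNat (48 + c.toNat % 16) else Char.ofNat (55 + c.toNat % 16))]

-- _NEEDS_ESCAPE.sub(_escape, s): replace every matched (single-char) span, keep the rest
def pvRegexSubB (cs : List Char) : List Char :=
  cs.flatMap (fun c => if pvRegexMatchB c then pvEscapeB c else [c])

def llvm_name_py_alt (symbol_name : String) : String :=
  String.ofList ('"' :: pvRegexSubB symbol_name.toList ++ ['"'])

-- ===== PRECONDITION & SPEC =====
def Spec_llvm_name_py (symbol_name : String) (out : String) : Prop := out = llvm_name_py_alt symbol_name
instance (symbol_name : String) (out : String) : Decidable (Spec_llvm_name_py symbol_name out) := by unfold Spec_llvm_name_py; infer_instance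

-- ===== CLAIM (what is proved, stated in full; the proofs are below) =====
def Claim_equal_llvm_name_py : Prop := ∀ (symbol_name : String), Dom_llvm_name_py symbol_name → Spec_llvm_name_py symbol_name (llvm_name_py symbol_name)

-- ===== LEMMAS AND PROOFS =====

-- per-character agreement: A's branch produces exactly B's per-match replacement
theorem pv_char_eq (c : Char) :
    (if c = '"' ∨ c = '\\' ∨ c.toNat < 0x20 ∨ c.toNat > 0x7E then
      [['\\', pvHexDigitA (c.toNat / 16), pvHexDigitA (c.toNat % 16)]]
    else ([[c]] : List (List Char)))
    = [if pvRegexMatchB c then pvEscapeB c else [c]] := by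
  have hcond : (c = '"' ∨ c = '\\' ∨ c.toNat < 0x20 ∨ c.toNat > 0x7E) ↔ pvRegexMatchB c = true := by
    have h1 : (c = '"') ↔ c.toNat = 34 := eq_iff_eq_of_cmp_eq_cmp rfl
    have h2 : (c = '\\') ↔ c.toNat = 92 := eq_iff_eq_of_cmp_eq_cmp rfl
    simp only [pvRegexMatchB, Bool.or_eq_true, beq_iff_eq, Bool.and_eq_false_iff,
      decide_eq_false_iff_not, not_le, h1, h2, Bool.not_eq_eq_eq_not, Bool.not_true]
    omega
  by_cases h : pvRegexMatchB c = true
  · rw [if_pos (hcond.mpr h), if_pos h]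
    simp [pvHexDigitA, pvEscapeB]
  · rw [if_neg (fun hc => h (hcond.mp hc)), if_neg h]

-- ===== VERDICT (by name: the statement is the Claim_ definition above) =====
theorem llvm_name_py_spec : Claim_equal_llvm_name_py := by
  intro s _
  unfold Spec_llvm_name_py llvm_name_py llvm_name_py_alt pvRegexSubB
  have hfold : s.toList.foldl (fun acc char =>
      let code_point := char.toNat
      if char = '"' ∨ char = '\\' ∨ code_point < 0x20 ∨ code_point > 0x7E then
        acc ++ [['\\', pvHexDigitA (code_point / 16), pvHexDigitA (code_point % 16)]]
      else acc ++ [[char]]) []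
      = s.toList.map (fun c => if pvRegexMatchB c then pvEscapeB c else [c]) := by
    induction s.toList using List.reverseRecOn with
    | nil => rfl
    | append_singleton t c ih =>
        rw [List.foldl_append, List.map_append, ih, List.foldl_cons, List.foldl_nil]
        have h := pv_char_eq c
        simp only [List.map_cons, List.map_nil] at h ⊢
        split_ifs at h ⊢ <;> simp_all
  simp only [hfold, List.flatMap_def]
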